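-- pv_equiv track=rewrite | github.com/SE6362DreamTeam/GoodProject | OLD - KWIC2.py | shift_current_line
-- ===== SOURCE A (Python) =====
-- def shift_current_line(current_line: str) -> str:
--     # Split the current line by spaces
--     words = current_line.split(" ")
--
--     # If there are n-1 words in a line, then n circular shifts must occur for the line
--     # to return to its original state
--     num_iterations = len(words)
--     # Iterate until n iterations is reached (should have original line at nth iteration)
--     shiftedLines = []
--     for i in range(num_iterations):
--         # Remove the first word in words array
--         popped_term = words.pop(0)
--         # Add it to the end of words array
--         words.append(popped_term)
--         # Join the words array with spaces and store it in line (one whole string now)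
--         line = " ".join(words)
--         shiftedLines.append(line)
--     return shiftedLines
-- ===== SOURCE B (Python) =====
-- def shift_current_line(current_line: str) -> str:
--     # Stateless: each rotation is computed directly from the original word list by slicing.
--     words = current_line.split(" ")
--     return [" ".join(words[i+1:] + words[:i+1]) for i in range(len(words))]
-- ===== Notes on version B (the rewrite author's own statement) =====
-- stated objective: simpler
-- what changed: Replaced the stateful pop(0)/append rotation loop (each iteration depends on the mutated list left by the previous one) with a single comprehension that computes every rotation independently from the original word list by slicing.
import Mathlib
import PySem

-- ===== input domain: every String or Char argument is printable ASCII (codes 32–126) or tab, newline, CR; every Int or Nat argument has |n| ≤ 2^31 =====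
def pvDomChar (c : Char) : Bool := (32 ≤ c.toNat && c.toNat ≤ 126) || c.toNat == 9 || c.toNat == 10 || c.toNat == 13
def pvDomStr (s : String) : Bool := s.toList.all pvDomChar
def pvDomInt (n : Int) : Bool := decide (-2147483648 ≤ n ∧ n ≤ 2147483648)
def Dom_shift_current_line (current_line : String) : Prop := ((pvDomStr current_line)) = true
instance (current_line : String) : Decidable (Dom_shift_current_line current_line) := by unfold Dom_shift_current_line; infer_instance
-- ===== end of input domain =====

-- B replaces A's stateful pop(0)/append rotation loop by computing each rotation
-- independently from the original word list via slicing (simpler decomposition, same cost).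

-- ===== PORT A =====
-- one loop iteration: pop the first word, append it at the end, record the joined line
def shiftStep (st : List String × List String) (_ : Nat) : List String × List String :=
  match st.1 with
  | [] => st  -- unreachable: words is never empty inside the loop
  | popped :: rest =>
    let ws := rest ++ [popped]
    (ws, st.2 ++ [PySem.Str.join " " ws])

def shift_current_line (current_line : String) : List String :=
  let words := (PySem.Str.split? current_line " ").getD []  -- sep = " " ≠ "", so split? is always some
  let num_iterations := words.length
  ((List.range num_iterations).foldl shiftStep (words, [])).2

-- ===== PORT B =====
-- words[i+1:] + words[:i+1] with nonnegative bounds is exactly drop/take (PySem slice_from/slice_to)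
def shift_current_line_alt (current_line : String) : List String :=
  let words := (PySem.Str.split? current_line " ").getD []  -- sep = " " ≠ "", so split? is always some
  (List.range words.length).map (fun i =>
    PySem.Str.join " " (words.drop (i + 1) ++ words.take (i + 1)))

-- ===== PRECONDITION & SPEC =====
def Spec_shift_current_line (current_line : String) (out : List String) : Prop := out = shift_current_line_alt current_line
instance (current_line : String) (out : List String) : Decidable (Spec_shift_current_line current_line out) := by unfold Spec_shift_current_line; infer_instance

-- ===== CLAIM (what is proved, stated in full; the proofs are below) =====
def Claim_equal_shift_current_line : Prop := ∀ (current_line : String), Dom_shift_current_line current_line → Spec_shift_current_line current_line (shift_current_line current_line)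

-- ===== LEMMAS AND PROOFS =====

theorem shiftStep_inv (words : List String) (n : Nat) (hn : n ≤ words.length) :
    (List.range n).foldl shiftStep (words, []) =
      (words.drop n ++ words.take n,
       (List.range n).map (fun i => PySem.Str.join " " (words.drop (i + 1) ++ words.take (i + 1)))) := by
  induction n with
  | zero => simp
  | succ n ih =>
    have hn' : n < words.length := by omega
    rw [List.range_succ, List.foldl_append, ih (by omega)]
    have hdrop : words.drop n = words[n] :: words.drop (n + 1) :=
      (List.getElem_cons_drop hn').symm
    have htake : words.take (n + 1) = words.take n ++ [words[n]] := by
      rw [List.take_add_one, List.getElem?_eq_getElem hn']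
      rfl
    simp only [List.foldl_cons, List.foldl_nil, shiftStep, hdrop, List.cons_append,
      List.map_append, List.map_cons, List.map_nil]
    rw [htake]
    simp

theorem shift_current_line_spec : Claim_equal_shift_current_line := by
  intro current_line _
  exact congrArg Prod.snd (shiftStep_inv ((PySem.Str.split? current_line " ").getD []) _ (le_refl _))
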